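-- pv_equiv track=rewrite | github.com/backcrawler/tni_solutions | TNI8.py | parse_content
-- ===== SOURCE A (Python) =====
-- from collections import namedtuple
--
-- parsingResult = namedtuple('Result', ['num_symbols', 'num_letters', 'num_words'])
--
-- def word_parser(word: str) -> tuple:
--     counter = 0
--     for char in word:
--         if char.isalpha():
--             counter += 1
--     if counter != 0:
--         flag = True
--     else:
--         flag = False
--     return flag, counter
--
-- def parse_content(content: str) -> tuple:
--     stripped = content.replace('\n', ' ').replace('\r', ' ')
--     num_symbols = len(stripped)
--     words = []
--     words_raw = stripped.split()
--     num_letters = 0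
--     for word in words_raw:
--         res = word_parser(word)
--         if res[0]:
--             words.append(word)
--         num_letters += res[1]
--     num_words = len(words)
--     return parsingResult(num_symbols, num_letters, num_words)
-- ===== SOURCE B (Python) =====
-- from collections import namedtuple
--
-- parsingResult = namedtuple('Result', ['num_symbols', 'num_letters', 'num_words'])
--
-- def parse_content(content: str) -> tuple:
--     # num_symbols equals len(content): the two single-char replaces preserve length.
--     num_symbols = len(content)
--     num_letters = sum(1 for c in content if c.isalpha())
--     num_words = sum(1 for w in content.split() if any(c.isalpha() for c in w))
--     return parsingResult(num_symbols, num_letters, num_words)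
-- ===== Notes on version B (the rewrite author's own statement) =====
-- stated objective: simpler
-- what changed: Drops the replace/strip step and the word_parser helper and intermediate words list: num_symbols is len(content) directly (single-char replaces preserve length), num_letters is one pass over the characters, num_words a separate pass over content.split() counting tokens containing a letter.
import Mathlib
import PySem

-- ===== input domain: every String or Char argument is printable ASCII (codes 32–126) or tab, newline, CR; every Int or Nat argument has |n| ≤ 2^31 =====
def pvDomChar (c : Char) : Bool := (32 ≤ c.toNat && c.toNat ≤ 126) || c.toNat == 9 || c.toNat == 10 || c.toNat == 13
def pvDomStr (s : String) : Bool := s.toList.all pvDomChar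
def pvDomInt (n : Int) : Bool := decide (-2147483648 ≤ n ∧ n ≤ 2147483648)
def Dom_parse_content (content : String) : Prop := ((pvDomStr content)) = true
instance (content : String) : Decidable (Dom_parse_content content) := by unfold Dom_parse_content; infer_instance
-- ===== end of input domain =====

-- B drops the replace step and the word_parser helper: len(content) directly, one pass
-- counting letters, one pass over split() counting tokens with a letter (objective: simpler).

-- ===== PORT A =====
def word_parser (word : String) : Bool × Int :=
  let counter : Int := word.toList.foldl
    (fun counter char => if PySem.Chars.isalpha char then counter + 1 else counter) 0
  let flag : Bool := if counter ≠ 0 then true else false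
  (flag, counter)

def parse_content (content : String) : Int × Int × Int :=
  let stripped := PySem.Str.replace (PySem.Str.replace content "\n" " ") "\r" " "
  let num_symbols : Int := PySem.Str.len stripped
  let words_raw := PySem.Str.split₀ stripped
  let st := words_raw.foldl (fun (s : List String × Int) word =>
      let res := word_parser word
      (if res.1 then s.1 ++ [word] else s.1, s.2 + res.2)) ([], 0)
  (num_symbols, st.2, (st.1.length : Int))

-- ===== PORT B =====
def parse_content_alt (content : String) : Int × Int × Int :=
  let num_symbols : Int := PySem.Str.len content
  let num_letters : Int :=
    ((content.toList.countP (fun c => PySem.Chars.isalpha c) : Nat) : Int)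
  let num_words : Int :=
    (((PySem.Str.split₀ content).countP
        (fun w => w.toList.any (fun c => PySem.Chars.isalpha c)) : Nat) : Int)
  (num_symbols, num_letters, num_words)

-- ===== PRECONDITION & SPEC =====
def Spec_parse_content (content : String) (out : Int × Int × Int) : Prop := out = parse_content_alt content
instance (content : String) (out : Int × Int × Int) : Decidable (Spec_parse_content content out) := by unfold Spec_parse_content; infer_instance

-- ===== CLAIM (what is proved, stated in full; the proofs are below) =====
def Claim_equal_parse_content : Prop := ∀ (content : String), Dom_parse_content content → Spec_parse_content content (parse_content content)

-- ===== LEMMAS AND PROOFS =====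

-- the character map performed by the two single-char replaces
def pvG (c : Char) : Char := if c = '\n' then ' ' else if c = '\r' then ' ' else c

lemma replace_go_single (a b : Char) (l : List Char) (fuel : Nat) (acc : List Char)
    (h : l.length ≤ fuel) :
    PySem.Chars.replace.go [a] [b] fuel l acc
      = acc.reverse ++ l.map (fun c => if c = a then b else c) := by
  induction l generalizing fuel acc with
  | nil =>
    cases fuel <;> simp [PySem.Chars.replace.go]
  | cons c t ih =>
    cases fuel with
    | zero => simp at h
    | succ fuel =>
      simp only [List.length_cons, Nat.succ_le_succ_iff] at h
      by_cases hc : c = a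
      · subst hc
        simp only [PySem.Chars.replace.go, List.isPrefixOf, BEq.rfl,
          List.isPrefixOf_nil_left, Bool.and_true]
        rw [if_pos trivial]
        simp only [List.length_cons, List.length_nil, Nat.zero_add, List.drop_succ_cons,
          List.drop_zero]
        rw [ih fuel _ h]
        simp
      · rw [PySem.Chars.replace.go]
        have : [a].isPrefixOf (c :: t) = false := by
          simp only [List.isPrefixOf, List.isPrefixOf_nil_left, Bool.and_true,
            beq_eq_false_iff_ne, Ne]
          exact fun hh => hc hh.symm
        rw [this]
        simp only [Bool.false_eq_true, if_false]
        rw [ih fuel _ h]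
        simp [hc]

lemma replace_single (a b : Char) (s : List Char) :
    PySem.Chars.replace s [a] [b] = s.map (fun c => if c = a then b else c) := by
  simp [PySem.Chars.replace, replace_go_single a b s s.length [] le_rfl]

lemma stripped_toList (content : String) :
    (PySem.Str.replace (PySem.Str.replace content "\n" " ") "\r" " ").toList
      = content.toList.map pvG := by
  simp only [PySem.Str.toList_replace]
  show PySem.Chars.replace (PySem.Chars.replace content.toList ['\n'] [' ']) ['\r'] [' ']
       = content.toList.map pvG
  rw [replace_single, replace_single, List.map_map]
  apply List.map_congr_left
  intro c _
  simp only [Function.comp, pvG]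
  split_ifs <;> simp_all

lemma isspace_pvG (c : Char) : PySem.Chars.isspace (pvG c) = PySem.Chars.isspace c := by
  unfold pvG
  split_ifs <;> simp_all <;> decide

lemma pvG_of_not_space (c : Char) (h : PySem.Chars.isspace c = false) : pvG c = c := by
  unfold pvG
  split_ifs with h1 h2 <;> simp_all <;> revert h <;> decide

lemma split₀_go_map (l : List Char) (cur : List Char) (acc : List (List Char)) :
    PySem.Chars.split₀.go (l.map pvG) cur acc = PySem.Chars.split₀.go l cur acc := by
  induction l generalizing cur acc with
  | nil => simp
  | cons c t ih =>
    simp only [List.map_cons]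
    rw [PySem.Chars.split₀.go, PySem.Chars.split₀.go, isspace_pvG]
    by_cases hs : PySem.Chars.isspace c = true
    · rw [if_pos hs, if_pos hs]
      by_cases hc : cur.isEmpty = true
      · rw [if_pos hc, if_pos hc, ih]
      · rw [if_neg hc, if_neg hc, ih]
    · rw [if_neg hs, if_neg hs, pvG_of_not_space c (by simpa using hs), ih]

lemma split₀_map (s : List Char) :
    PySem.Chars.split₀ (s.map pvG) = PySem.Chars.split₀ s := by
  simp [PySem.Chars.split₀, split₀_go_map]

lemma isspace_not_alpha (c : Char) (h : PySem.Chars.isspace c = true) :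
    PySem.Chars.isalpha c = false := by
  simp only [PySem.Chars.isspace, Char.toNat, Bool.or_eq_true, Bool.and_eq_true,
    decide_eq_true_eq] at h
  simp only [PySem.Chars.isalpha, PySem.Chars.isupper, PySem.Chars.islower,
    Bool.or_eq_false_iff, Bool.and_eq_false_iff, decide_eq_false_iff_not, not_le,
    Char.le_def, UInt32.le_iff_toNat_le]
  have hA : ('A').val.toNat = 65 := rfl
  have hZ : ('Z').val.toNat = 90 := rfl
  have ha : ('a').val.toNat = 97 := rfl
  have hz : ('z').val.toNat = 122 := rfl
  omega

lemma go_count (l cur : List Char) (acc : List (List Char)) :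
    (((PySem.Chars.split₀.go l cur acc).map
        (fun w => (w.countP (fun c => PySem.Chars.isalpha c) : Int))).sum)
      = ((acc.map (fun w => (w.countP (fun c => PySem.Chars.isalpha c) : Int))).sum)
        + (cur.countP (fun c => PySem.Chars.isalpha c) : Int)
        + (l.countP (fun c => PySem.Chars.isalpha c) : Int) := by
  induction l generalizing cur acc with
  | nil =>
    rw [PySem.Chars.split₀.go]
    by_cases hc : cur.isEmpty = true
    · rw [if_pos hc]
      obtain rfl : cur = [] := by simpa using hc
      simp
    · rw [if_neg hc]
      simp [List.sum_reverse]
  | cons c t ih =>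
    rw [PySem.Chars.split₀.go]
    by_cases hs : PySem.Chars.isspace c = true
    · rw [if_pos hs]
      have halpha := isspace_not_alpha c hs
      by_cases hc : cur.isEmpty = true
      · rw [if_pos hc]
        obtain rfl : cur = [] := by simpa using hc
        rw [ih]
        simp [List.countP_cons, halpha]
      · rw [if_neg hc]
        rw [ih]
        simp [List.countP_cons, halpha, List.sum_reverse]
        push_cast
        ring
    · rw [if_neg hs]
      rw [ih]
      simp [List.countP_cons]
      split_ifs
      · push_cast; ring
      · ring

lemma counter_eq (w : String) :
    (word_parser w).2 = ((w.toList.countP (fun c => PySem.Chars.isalpha c) : Nat) : Int) := by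
  simp [word_parser, PySem.List.foldl_if_add_one]

lemma flag_eq (w : String) :
    (word_parser w).1 = w.toList.any (fun c => PySem.Chars.isalpha c) := by
  simp only [word_parser, PySem.List.foldl_if_add_one, zero_add]
  rcases h : w.toList.any (fun c => PySem.Chars.isalpha c) with _ | _
  · have : w.toList.countP (fun c => PySem.Chars.isalpha c) = 0 := by
      rw [List.countP_eq_zero]
      intro a ha
      have := List.any_eq_false.mp h a ha
      simp_all
    simp [this]
  · have : w.toList.countP (fun c => PySem.Chars.isalpha c) ≠ 0 := by
      obtain ⟨a, ha, hpa⟩ := List.any_eq_true.mp h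
      have h3 := List.countP_pos_iff.mpr ⟨a, ha, hpa⟩
      exact Nat.pos_iff_ne_zero.mp h3
    have h2 : ((w.toList.countP (fun c => PySem.Chars.isalpha c) : Nat) : Int) ≠ 0 := by
      exact_mod_cast this
    simp only [ne_eq, h2, not_false_eq_true, if_true]

-- ===== VERDICT (by name: the statement is the Claim_ definition above) =====
theorem parse_content_spec : Claim_equal_parse_content := by
  intro content _
  unfold Spec_parse_content
  simp only [parse_content, parse_content_alt]
  rw [PySem.List.foldl_prod_mk
    (f := fun acc word => if (word_parser word).1 then acc ++ [word] else acc)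
    (g := fun acc word => acc + (word_parser word).2)]
  rw [PySem.List.foldl_append_if, PySem.List.foldl_add]
  have hsplit : PySem.Str.split₀ (PySem.Str.replace (PySem.Str.replace content "\n" " ") "\r" " ")
      = PySem.Str.split₀ content := by
    simp only [PySem.Str.split₀, stripped_toList, split₀_map]
  rw [hsplit]
  simp only [Prod.mk.injEq, List.nil_append, zero_add]
  refine ⟨?_, ?_, ?_⟩
  · rw [PySem.Str.len_eq, PySem.Str.len_eq, stripped_toList, List.length_map]
  · rw [List.map_congr_left (fun w _ => counter_eq w)]
    simp only [PySem.Str.split₀, List.map_map]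
    rw [List.map_congr_left (f := (fun w => ((List.countP (fun c => PySem.Chars.isalpha c) w.toList : Nat) : Int)) ∘ String.ofList)
      (g := fun w => ((List.countP (fun c => PySem.Chars.isalpha c) w : Nat) : Int))
      (fun w _ => by simp)]
    have h0 := go_count content.toList [] []
    simpa [PySem.Chars.split₀] using h0
  · rw [List.filter_congr (fun w _ => flag_eq w)]
    simp [← List.countP_eq_length_filter]
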